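-- pv_equiv track=rewrite | github.com/vihaannnn/Threat-Intel-Agent | core/web_ui.py | extract_ecosystems
-- ===== SOURCE A (Python) =====
-- from typing import Dict, Any, List, Optional
--
-- def extract_ecosystems(text: str) -> List[str]:
--     """Extract ecosystem mentions from text"""
--     ecosystem_map = {
--         "python": "PyPI",
--         "pypi": "PyPI",
--         "npm": "npm",
--         "node": "npm",
--         "node.js": "npm",
--         "java": "Maven",
--         "maven": "Maven",
--         "go": "Go",
--         "golang": "Go",
--         "debian": "Debian",
--         "ubuntu": "Debian",
--         "linux": "Debian"
--     }
--
--     ecosystems = []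
--     text_lower = text.lower()
--     for keyword, ecosystem in ecosystem_map.items():
--         if keyword in text_lower:
--             if ecosystem not in ecosystems:
--                 ecosystems.append(ecosystem)
--     return ecosystems
-- ===== SOURCE B (Python) =====
-- def extract_ecosystems(text: str) -> list:
--     """Extract ecosystem mentions from text (ecosystem -> keywords, one pass, no dedup step)"""
--     groups = [
--         ("PyPI", ["python", "pypi"]),
--         ("npm", ["npm", "node", "node.js"]),
--         ("Maven", ["java", "maven"]),
--         ("Go", ["go", "golang"]),
--         ("Debian", ["debian", "ubuntu", "linux"]),
--     ]
--     text_lower = text.lower()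
--     return [eco for eco, keywords in groups
--             if any(k in text_lower for k in keywords)]
-- ===== Notes on version B (the rewrite author's own statement) =====
-- stated objective: simpler
-- what changed: B inverts the mapping to ecosystem-to-keywords lists and builds the result in a single comprehension over the five ecosystems (one any() per ecosystem), so A's per-keyword loop with its membership-dedup branch disappears.
import Mathlib
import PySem

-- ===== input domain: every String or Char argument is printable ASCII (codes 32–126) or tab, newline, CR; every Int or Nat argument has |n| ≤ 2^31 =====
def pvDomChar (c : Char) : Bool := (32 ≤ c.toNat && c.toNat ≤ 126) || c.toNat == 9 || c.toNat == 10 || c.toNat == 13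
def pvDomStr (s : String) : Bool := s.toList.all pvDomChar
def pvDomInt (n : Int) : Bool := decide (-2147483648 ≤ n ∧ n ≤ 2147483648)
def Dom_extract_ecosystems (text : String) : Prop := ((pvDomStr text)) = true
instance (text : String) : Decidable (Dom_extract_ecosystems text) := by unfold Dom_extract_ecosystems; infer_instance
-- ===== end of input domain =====

-- B inverts the mapping to ecosystem -> keyword list and emits each ecosystem once via a single
-- filtering pass (objective: simpler — A's per-keyword dedup branch disappears).


-- ===== PORT A =====
-- loop body of A, named so the proof lemmas can speak about it
def pvStepA (text_lower : String) (ecosystems : List String) (kv : String × String) : List String :=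
  if PySem.Str.isIn kv.1 text_lower then
    if kv.2 ∈ ecosystems then ecosystems else ecosystems ++ [kv.2]
  else ecosystems

def extract_ecosystems (text : String) : List String :=
  let ecosystem_map : List (String × String) :=
    [("python", "PyPI"), ("pypi", "PyPI"), ("npm", "npm"), ("node", "npm"),
     ("node.js", "npm"), ("java", "Maven"), ("maven", "Maven"), ("go", "Go"),
     ("golang", "Go"), ("debian", "Debian"), ("ubuntu", "Debian"), ("linux", "Debian")]
  let text_lower := PySem.Str.lower text
  ecosystem_map.foldl (pvStepA text_lower) []

-- ===== PORT B =====
def extract_ecosystems_alt (text : String) : List String :=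
  let groups : List (String × List String) :=
    [("PyPI", ["python", "pypi"]), ("npm", ["npm", "node", "node.js"]),
     ("Maven", ["java", "maven"]), ("Go", ["go", "golang"]),
     ("Debian", ["debian", "ubuntu", "linux"])]
  let text_lower := PySem.Str.lower text
  (groups.filter (fun g => g.2.any (fun k => PySem.Str.isIn k text_lower))).map (·.1)

-- ===== PRECONDITION & SPEC =====
def Spec_extract_ecosystems (text : String) (out : List String) : Prop := out = extract_ecosystems_alt text
instance (text : String) (out : List String) : Decidable (Spec_extract_ecosystems text out) := by unfold Spec_extract_ecosystems; infer_instance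

-- ===== CLAIM (what is proved, stated in full; the proofs are below) =====
def Claim_equal_extract_ecosystems : Prop := ∀ (text : String), Dom_extract_ecosystems text → Spec_extract_ecosystems text (extract_ecosystems text)

-- ===== LEMMAS AND PROOFS =====

-- Once an ecosystem label is already in the accumulator, a whole block of keywords mapping to it
-- leaves the accumulator unchanged.
theorem pvBlock_mem (tl e : String) (ks : List String) (acc : List String) (h : e ∈ acc) :
    (ks.map (fun k => (k, e))).foldl (pvStepA tl) acc = acc := by
  induction ks with
  | nil => rfl
  | cons k t ih => simp [pvStepA, h, ih]

-- A contiguous block of keywords all mapping to label e, starting from an accumulator not yet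
-- containing e, appends e exactly when some keyword of the block occurs in the text.
theorem pvBlock (tl e : String) (ks : List String) (acc : List String) (h : e ∉ acc) :
    (ks.map (fun k => (k, e))).foldl (pvStepA tl) acc
      = acc ++ (if ks.any (fun k => PySem.Str.isIn k tl) then [e] else []) := by
  induction ks with
  | nil => simp
  | cons k t ih =>
    simp only [List.map_cons, List.foldl_cons, List.any_cons]
    by_cases hk : PySem.Chars.isIn k.toList tl.toList = true
    · have hmem := pvBlock_mem tl e t (acc ++ [e]) (by simp)
      simp [pvStepA, hk, h, hmem]
    · simp only [Bool.not_eq_true] at hk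
      simp [pvStepA, hk, ih]

theorem extract_ecosystems_spec' (text : String) :
    extract_ecosystems text = extract_ecosystems_alt text := by
  unfold extract_ecosystems extract_ecosystems_alt
  set tl := PySem.Str.lower text with htl
  have hsplit :
      ([("python", "PyPI"), ("pypi", "PyPI"), ("npm", "npm"), ("node", "npm"),
        ("node.js", "npm"), ("java", "Maven"), ("maven", "Maven"), ("go", "Go"),
        ("golang", "Go"), ("debian", "Debian"), ("ubuntu", "Debian"), ("linux", "Debian")]
          : List (String × String))
      = (["python", "pypi"].map (fun k => (k, "PyPI")))
        ++ (["npm", "node", "node.js"].map (fun k => (k, "npm")))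
        ++ (["java", "maven"].map (fun k => (k, "Maven")))
        ++ (["go", "golang"].map (fun k => (k, "Go")))
        ++ (["debian", "ubuntu", "linux"].map (fun k => (k, "Debian"))) := by rfl
  rw [hsplit, List.foldl_append, List.foldl_append, List.foldl_append, List.foldl_append]
  rw [pvBlock tl "PyPI" ["python", "pypi"] [] (by simp)]
  rw [pvBlock tl "npm" ["npm", "node", "node.js"] _ (by split_ifs <;> simp)]
  rw [pvBlock tl "Maven" ["java", "maven"] _ (by split_ifs <;> simp)]
  rw [pvBlock tl "Go" ["go", "golang"] _ (by split_ifs <;> simp)]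
  rw [pvBlock tl "Debian" ["debian", "ubuntu", "linux"] _ (by split_ifs <;> simp)]
  obtain h1 | h1 := Bool.eq_false_or_eq_true
    (PySem.Chars.isIn ['p','y','t','h','o','n'] tl.toList || PySem.Chars.isIn ['p','y','p','i'] tl.toList) <;>
  obtain h2 | h2 := Bool.eq_false_or_eq_true
    (PySem.Chars.isIn ['n','p','m'] tl.toList || (PySem.Chars.isIn ['n','o','d','e'] tl.toList ||
      PySem.Chars.isIn ['n','o','d','e','.','j','s'] tl.toList)) <;>
  obtain h3 | h3 := Bool.eq_false_or_eq_true
    (PySem.Chars.isIn ['j','a','v','a'] tl.toList || PySem.Chars.isIn ['m','a','v','e','n'] tl.toList) <;>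
  obtain h4 | h4 := Bool.eq_false_or_eq_true
    (PySem.Chars.isIn ['g','o'] tl.toList || PySem.Chars.isIn ['g','o','l','a','n','g'] tl.toList) <;>
  obtain h5 | h5 := Bool.eq_false_or_eq_true
    (PySem.Chars.isIn ['d','e','b','i','a','n'] tl.toList || (PySem.Chars.isIn ['u','b','u','n','t','u'] tl.toList ||
      PySem.Chars.isIn ['l','i','n','u','x'] tl.toList)) <;>
  simp [List.filter, List.any_cons, List.any_nil, Bool.or_false, h1, h2, h3, h4, h5]

-- ===== VERDICT (by name: the statement is the Claim_ definition above) =====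
theorem extract_ecosystems_spec : Claim_equal_extract_ecosystems := by
  intro text _
  exact extract_ecosystems_spec' text
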